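-- pv_equiv track=rewrite | github.com/BaekjoonCodingStudy/BaekJoon | 백준/2번문제/이채현/Q16508.py | check_character
-- ===== SOURCE A (Python) =====
-- def check_character(letter, books):
--     # 모든 책의 문자들을 사용하여 문자열을 형성할 수 있는지 확인
--     total_chars = {} # 각 문자가 책들의 제목에서 몇 번 나타나는지 # defaultdict
--     for i in books: # 책 리스트 books를 순회
--         for j in i[1]:
--             if j in total_chars: # 문자 출현 횟수를 total_chars에 기록
--                 total_chars[j] += 1
--             else:
--                 total_chars[j] = 1
--
--     for j in letter: # 주어진 문자열 T의 각 문자를 확인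
--         if j not in total_chars or total_chars[j] == 0: # 만약 j가 total_chars가 없거나 해당 문자의 카운트가 0이면
--             return False # 해당 조합으로는 T를 만들 수 없으므로 False를 반환
--         total_chars[j] -= 1 # 그리고 문자 j의 출현 가능 횟수를 줄임.
--     return True # 모든 문자에 대해 충분한 출현 횟수 있으면 True 반환. 이 조합으로 T 생성 가능
-- ===== SOURCE B (Python) =====
-- def check_character(letter, books):
--     # Sort-based: sort the pool of all title characters and the letter, then
--     # decide the multiset-inclusion with a single two-pointer merge scan.
--     pool = sorted(c for _, title in books for c in title)
--     need = sorted(letter)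
--     i = 0
--     for c in pool:
--         if i == len(need):
--             break
--         if need[i] == c:
--             i += 1
--         elif c > need[i]:
--             return False
--     return i == len(need)
-- ===== Notes on version B (the rewrite author's own statement) =====
-- stated objective: alternative
-- what changed: Replaces A's frequency-dict build plus consume-and-decrement walk with sorting the pooled title characters and the letter and deciding multiset inclusion by a single two-pointer merge scan.
import Mathlib
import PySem

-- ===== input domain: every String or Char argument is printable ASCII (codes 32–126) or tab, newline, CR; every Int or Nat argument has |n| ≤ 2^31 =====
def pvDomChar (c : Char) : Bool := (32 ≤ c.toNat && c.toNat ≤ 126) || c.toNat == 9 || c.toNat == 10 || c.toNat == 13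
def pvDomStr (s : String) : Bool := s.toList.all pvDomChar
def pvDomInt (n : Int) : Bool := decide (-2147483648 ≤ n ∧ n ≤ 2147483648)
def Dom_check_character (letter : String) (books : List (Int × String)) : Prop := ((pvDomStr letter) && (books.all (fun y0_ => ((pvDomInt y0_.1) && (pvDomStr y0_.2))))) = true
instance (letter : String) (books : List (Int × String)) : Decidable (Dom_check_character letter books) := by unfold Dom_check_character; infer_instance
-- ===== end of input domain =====

-- B replaces A's frequency-dict consume-and-decrement with sorting the pool and the
-- letter and deciding multiset inclusion by a two-pointer merge scan (alternative; same task, different algorithm).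


-- ===== PORT A =====
-- total_chars build: 'if j in total_chars: total_chars[j] += 1 else: total_chars[j] = 1'
def chkAddBook (d : PySem.Dict Char Int) (title : String) : PySem.Dict Char Int :=
  title.toList.foldl
    (fun d j => if d.contains j then d.insert j (d.getD j 0 + 1) else d.insert j 1) d

-- the consume loop: 'for j in letter: if j not in … or … == 0: return False; total_chars[j] -= 1'
def chkConsume : List Char → PySem.Dict Char Int → Bool
  | [], _ => true
  | j :: rest, d =>
    if !d.contains j || d.getD j 0 == 0 then false
    else chkConsume rest (d.insert j (d.getD j 0 - 1))

def check_character (letter : String) (books : List (Int × String)) : Bool :=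
  let total := books.foldl (fun d i => chkAddBook d i.2) PySem.Dict.empty
  chkConsume letter.toList total

-- ===== PORT B =====
-- the two-pointer merge scan over (sorted need, sorted pool):
-- match heads / fail when the pool head already exceeds the need head / skip the pool head
def twoPtr : List Char → List Char → Bool
  | [], _ => true
  | _ :: _, [] => false
  | a :: as, b :: bs =>
    if a = b then twoPtr as bs
    else if a < b then false
    else twoPtr (a :: as) bs

def check_character_alt (letter : String) (books : List (Int × String)) : Bool :=
  let pool := PySem.List.sorted (books.flatMap (fun i => i.2.toList)) (fun c => c) false
  let need := PySem.List.sorted letter.toList (fun c => c) false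
  twoPtr need pool

-- ===== PRECONDITION & SPEC =====
def Spec_check_character (letter : String) (books : List (Int × String)) (out : Bool) : Prop := out = check_character_alt letter books
instance (letter : String) (books : List (Int × String)) (out : Bool) : Decidable (Spec_check_character letter books out) := by unfold Spec_check_character; infer_instance

-- ===== CLAIM (what is proved, stated in full; the proofs are below) =====
def Claim_equal_check_character : Prop := ∀ (letter : String) (books : List (Int × String)), Dom_check_character letter books → Spec_check_character letter books (check_character letter books)

-- ===== LEMMAS AND PROOFS =====

theorem getD_of_not_contains (d : PySem.Dict Char Int) (c : Char) (h : d.contains c = false) :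
    d.getD c 0 = 0 := by
  simp [PySem.Dict.getD, (PySem.Dict.get?_eq_none_iff_contains d c).2 h]

-- A's build step equals an unconditional getD-insert step
theorem chkAddBook_eq (d : PySem.Dict Char Int) (t : String) :
    chkAddBook d t = t.toList.foldl (fun d c => d.insert c (d.getD c 0 + 1)) d := by
  unfold chkAddBook
  congr 1
  funext d j
  by_cases h : d.contains j = true
  · simp [h]
  · simp only [Bool.not_eq_true] at h
    simp [h, getD_of_not_contains d j h]

-- value of the nested build over all books
theorem getD_build (books : List (Int × String)) (d : PySem.Dict Char Int) (c : Char) :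
    (books.foldl (fun d i => i.2.toList.foldl (fun d c => d.insert c (d.getD c 0 + 1)) d) d).getD c 0
      = d.getD c 0 + ((books.flatMap (fun i => i.2.toList)).count c : Int) := by
  induction books generalizing d with
  | nil => simp
  | cons b bs ih =>
    simp only [List.foldl_cons, List.flatMap_cons, List.count_append]
    rw [ih, PySem.Dict.getD_foldl_insert_add_one]
    push_cast
    ring

-- the consume loop succeeds iff every remaining character is sufficiently available
theorem chkConsume_iff (cs : List Char) (d : PySem.Dict Char Int)
    (hnn : ∀ x, 0 ≤ d.getD x 0) :
    chkConsume cs d = true ↔ ∀ x, (cs.count x : Int) ≤ d.getD x 0 := by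
  induction cs generalizing d with
  | nil => simp [chkConsume, hnn]
  | cons c rest ih =>
    by_cases hz : d.getD c 0 = 0
    · have hfail : (!d.contains c || d.getD c 0 == 0) = true := by simp [hz]
      simp only [chkConsume, hfail, if_true]
      constructor
      · intro h; exact absurd h (by simp)
      · intro h
        have := h c
        simp [hz] at this
        omega
    · have hcont : d.contains c = true := by
        by_contra h
        simp only [Bool.not_eq_true] at h
        exact hz (getD_of_not_contains d c h)
      have hfail : (!d.contains c || d.getD c 0 == 0) = false := by simp [hcont, hz]
      simp only [chkConsume, hfail, Bool.false_eq_true, if_false]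
      have hnn' : ∀ x, 0 ≤ (d.insert c (d.getD c 0 - 1)).getD x 0 := by
        intro x
        rw [PySem.Dict.getD_insert]
        split_ifs with hx
        · have := hnn c; omega
        · exact hnn x
      rw [ih _ hnn']
      constructor
      · intro h x
        have hx2 := h x
        rw [PySem.Dict.getD_insert] at hx2
        by_cases hx : x = c
        · subst hx
          rw [if_pos rfl] at hx2
          have hcnt : (x :: rest).count x = rest.count x + 1 := by simp
          rw [hcnt]; push_cast; omega
        · rw [if_neg hx] at hx2
          have hcnt : (c :: rest).count x = rest.count x := by
            simp [Ne.symm hx]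
          rw [hcnt]; omega
      · intro h x
        have hx2 := h x
        rw [PySem.Dict.getD_insert]
        by_cases hx : x = c
        · subst hx
          rw [if_pos rfl]
          have hcnt : (x :: rest).count x = rest.count x + 1 := by simp
          rw [hcnt] at hx2; push_cast at hx2; omega
        · rw [if_neg hx]
          have hcnt : (c :: rest).count x = rest.count x := by
            simp [Ne.symm hx]
          rw [hcnt] at hx2; omega

-- for a sorted pool, the two-pointer scan decides the sublist relation
theorem twoPtr_iff_sublist (bs : List Char) (hbs : bs.Pairwise (· ≤ ·)) :
    ∀ as : List Char, (twoPtr as bs = true ↔ List.Sublist as bs) := by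
  induction bs with
  | nil =>
    intro as
    cases as with
    | nil => simp [twoPtr]
    | cons a as => simp [twoPtr]
  | cons b bs ih =>
    have hble : ∀ x ∈ bs, b ≤ x := (List.pairwise_cons.1 hbs).1
    have hbs' : bs.Pairwise (· ≤ ·) := (List.pairwise_cons.1 hbs).2
    intro as
    cases as with
    | nil => simp [twoPtr]
    | cons a as =>
      by_cases hab : a = b
      · subst hab
        have he : twoPtr (a :: as) (a :: bs) = twoPtr as bs := by simp [twoPtr]
        rw [he, ih hbs' as, List.cons_sublist_cons]
      · by_cases hlt : a < b
        · simp only [twoPtr, if_neg hab, if_pos hlt]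
          constructor
          · intro h; exact absurd h (by simp)
          · intro h
            have hmem : a ∈ b :: bs := h.subset (List.mem_cons_self)
            rcases List.mem_cons.1 hmem with h1 | h1
            · exact absurd h1 hab
            · exact absurd hlt (not_lt.2 (hble a h1))
        · simp only [twoPtr, if_neg hab, if_neg hlt]
          rw [ih hbs' (a :: as)]
          constructor
          · intro h; exact h.cons b
          · intro h
            rcases List.sublist_cons_iff.1 h with h1 | ⟨r, hr, _⟩
            · exact h1
            · injection hr with h2 _
              exact absurd h2 hab

theorem check_character_eq_alt (letter : String) (books : List (Int × String)) :
    check_character letter books = check_character_alt letter books := by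
  unfold check_character check_character_alt
  -- A side: reduce to the count condition
  have hbuild : (books.foldl (fun d i => chkAddBook d i.2) PySem.Dict.empty)
      = books.foldl (fun d i => i.2.toList.foldl (fun d c => d.insert c (d.getD c 0 + 1)) d)
          PySem.Dict.empty := by
    congr 1
    funext d i
    exact chkAddBook_eq d i.2
  rw [hbuild]
  set avail : PySem.Dict Char Int := books.foldl
    (fun d i => i.2.toList.foldl (fun d c => d.insert c (d.getD c 0 + 1)) d) PySem.Dict.empty
    with havail
  set P : List Char := books.flatMap (fun i => i.2.toList) with hP
  have hval : ∀ x, avail.getD x 0 = (P.count x : Int) := by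
    intro x; rw [havail, getD_build, hP]; simp
  have hnn : ∀ x, 0 ≤ avail.getD x 0 := by intro x; rw [hval]; positivity
  -- B side: reduce the two-pointer scan to the count condition
  set pool := PySem.List.sorted P (fun c => c) false with hpool
  set need := PySem.List.sorted letter.toList (fun c => c) false with hneed
  have hpoolp : pool.Pairwise (· ≤ ·) := by
    have := PySem.List.sorted_pairwise (xs := P) (key := fun c => c)
    simpa using this
  have hneedp : need.Pairwise (· ≤ ·) := by
    have := PySem.List.sorted_pairwise (xs := letter.toList) (key := fun c => c)
    simpa using this
  have hpoolperm : pool.Perm P := PySem.List.sorted_perm ..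
  have hneedperm : need.Perm letter.toList := PySem.List.sorted_perm ..
  rw [Bool.eq_iff_iff, chkConsume_iff _ _ hnn, twoPtr_iff_sublist pool hpoolp need]
  constructor
  · intro h
    apply List.sublist_of_subperm_of_pairwise _ hneedp hpoolp
    rw [List.subperm_iff_count]
    intro x
    rw [hneedperm.count_eq, hpoolperm.count_eq]
    have := h x
    rw [hval] at this
    exact_mod_cast this
  · intro h x
    rw [hval]
    have := List.subperm_iff_count.1 h.subperm x
    rw [hneedperm.count_eq, hpoolperm.count_eq] at this
    exact_mod_cast this

-- ===== VERDICT (by name: the statement is the Claim_ definition above) =====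
theorem check_character_spec : Claim_equal_check_character := by
  intro letter books _
  unfold Spec_check_character
  exact check_character_eq_alt letter books
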